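-- pv_equiv track=rewrite | github.com/DominikWiechert/advent-of-code | 2024/02/puzzle02.py | is_reactor_report_valid
-- ===== SOURCE A (Python) =====
-- def is_reactor_report_valid(vals: list[int], dampener_used: bool):
--     is_increasing = vals[1] > vals[0]
--     for i in range(1, len(vals)):
--         if is_increasing:
--             is_valid_incline = vals[i] > vals[i - 1] and abs(vals[i] - vals[i - 1]) <= 3
--         else:
--             is_valid_incline = vals[i] < vals[i - 1] and abs(vals[i] - vals[i - 1]) <= 3
--
--         if not is_valid_incline:
--             if dampener_used:
--                 return False
--             else:
--                 for j in range(0, len(vals)):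
--                     copy_vals = vals.copy()
--                     copy_vals.pop(j)
--                     if is_reactor_report_valid(copy_vals, True):
--                         return True
--                 return False
--     return True
-- ===== SOURCE B (Python) =====
-- def is_reactor_report_valid(vals: list[int], dampener_used: bool):
--     # O(n): a report is safe iff all consecutive diffs lie in [1,3] or all in [-3,-1];
--     # with the dampener available, only removing an endpoint of the FIRST bad diff can help.
--     def safe(xs, lo, hi):
--         return all(lo <= b - a <= hi for a, b in zip(xs, xs[1:]))
--
--     def fixable(lo, hi):
--         i = next((k for k in range(len(vals) - 1)
--                   if not lo <= vals[k + 1] - vals[k] <= hi), None)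
--         if i is None:
--             return True
--         return (safe(vals[:i] + vals[i + 1:], lo, hi)
--                 or safe(vals[:i + 1] + vals[i + 2:], lo, hi))
--
--     if dampener_used:
--         return safe(vals, 1, 3) or safe(vals, -3, -1)
--     return fixable(1, 3) or fixable(-3, -1)
-- ===== Notes on version B (the rewrite author's own statement) =====
-- stated objective: alternative
-- what changed: Replaces A's recursive brute force (on the first bad step, re-check a full copy of the list for every possible removal) by a direction-split linear scan that finds the first out-of-range difference and only re-checks the two removals that can repair it.
import Mathlib
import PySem

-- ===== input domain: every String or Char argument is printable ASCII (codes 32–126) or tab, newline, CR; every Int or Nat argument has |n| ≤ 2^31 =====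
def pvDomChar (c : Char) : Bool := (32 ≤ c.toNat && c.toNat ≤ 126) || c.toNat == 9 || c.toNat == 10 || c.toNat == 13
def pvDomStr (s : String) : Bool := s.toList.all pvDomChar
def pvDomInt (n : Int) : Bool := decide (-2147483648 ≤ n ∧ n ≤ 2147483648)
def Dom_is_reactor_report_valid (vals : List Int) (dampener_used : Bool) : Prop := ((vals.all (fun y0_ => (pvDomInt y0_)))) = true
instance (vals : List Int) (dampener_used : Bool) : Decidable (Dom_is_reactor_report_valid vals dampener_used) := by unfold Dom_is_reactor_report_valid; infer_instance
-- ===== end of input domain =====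

-- B replaces A's repeated-removal recursion (re-check a copy of the list for every possible
-- removal) by a direction-split scan that retries only the two removals around the first
-- out-of-range step (objective: alternative).

-- ===== PORT A =====
-- one step check: 'vals[i] > vals[i-1] (resp. <) and abs(vals[i] - vals[i-1]) <= 3'
def aPairOk (inc : Bool) (prev cur : Int) : Bool :=
  if inc then decide (prev < cur) && decide (|cur - prev| ≤ 3)
  else decide (cur < prev) && decide (|cur - prev| ≤ 3)

-- the 'for i in range(1, len(vals))' loop when dampener_used is True (failure returns False)
def aLoopT (vals : List Int) (inc : Bool) (i : Nat) : Bool :=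
  if i < vals.length then
    if aPairOk inc (vals.getD (i-1) 0) (vals.getD i 0) then aLoopT vals inc (i+1) else false
  else true
termination_by vals.length - i

-- the recursive call 'is_reactor_report_valid(copy_vals, True)' (always dampener True, so it
-- never recurses again; unrolled here as its own function)
def aCheckT (vals : List Int) : Bool :=
  match PySem.List.pyGet? vals 1, PySem.List.pyGet? vals 0 with
  | some v1, some v0 => aLoopT vals (decide (v0 < v1)) 1
  | _, _ => false  -- Python raises IndexError here (len < 2); unreachable from inputs in Pre_

-- 'for j in range(0, len(vals)): copy_vals.pop(j); if is_reactor_report_valid(copy_vals, True): return True'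
def aBrute (vals : List Int) (j : Nat) : Bool :=
  if j < vals.length then
    if aCheckT (vals.take j ++ vals.drop (j+1)) then true else aBrute vals (j+1)
  else false
termination_by vals.length - j

-- the main loop, dampener_used a parameter
def aLoop (vals : List Int) (inc : Bool) (damp : Bool) (i : Nat) : Bool :=
  if i < vals.length then
    if aPairOk inc (vals.getD (i-1) 0) (vals.getD i 0) then aLoop vals inc damp (i+1)
    else if damp then false else aBrute vals 0
  else true
termination_by vals.length - i

def is_reactor_report_valid (vals : List Int) (dampener_used : Bool) : Bool :=
  match PySem.List.pyGet? vals 1, PySem.List.pyGet? vals 0 with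
  | some v1, some v0 => aLoop vals (decide (v0 < v1)) dampener_used 1
  | _, _ => false  -- Python raises IndexError here (len < 2): outside Pre_

-- ===== PORT B =====
def bGood (lo hi d : Int) : Bool := decide (lo ≤ d) && decide (d ≤ hi)

-- 'all(lo <= b - a <= hi for a, b in zip(xs, xs[1:]))'
def bSafe (lo hi : Int) (xs : List Int) : Bool :=
  (xs.zip xs.tail).all (fun p => bGood lo hi (p.2 - p.1))

-- 'next((k for k in range(len(vals) - 1) if not lo <= vals[k+1] - vals[k] <= hi), None)'
def bFirstBad (lo hi : Int) (xs : List Int) (k : Nat) : Option Nat :=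
  if k + 1 < xs.length then
    if bGood lo hi (xs.getD (k+1) 0 - xs.getD k 0) then bFirstBad lo hi xs (k+1) else some k
  else none
termination_by xs.length - k

-- 'fixable(lo, hi)'  (vals[:i] + vals[i+1:] is take i ++ drop (i+1))
def bFix (lo hi : Int) (xs : List Int) : Bool :=
  match bFirstBad lo hi xs 0 with
  | none => true
  | some i => bSafe lo hi (xs.take i ++ xs.drop (i+1)) || bSafe lo hi (xs.take (i+1) ++ xs.drop (i+2))

def is_reactor_report_valid_alt (vals : List Int) (dampener_used : Bool) : Bool :=
  if dampener_used then bSafe 1 3 vals || bSafe (-3) (-1) vals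
  else bFix 1 3 vals || bFix (-3) (-1) vals

-- ===== PRECONDITION & SPEC =====
-- Pre_ excludes exactly the inputs where Python A raises IndexError: reports of length < 2
-- (vals[1] out of range), and length-2 reports with an invalid step and the dampener unused
-- (the removal loop recurses on a singleton).
def Pre_is_reactor_report_valid (vals : List Int) (dampener_used : Bool) : Prop :=
  2 ≤ vals.length ∧
  (vals.length = 2 ∧ dampener_used = false →
    1 ≤ |vals.getD 1 0 - vals.getD 0 0| ∧ |vals.getD 1 0 - vals.getD 0 0| ≤ 3)

instance (vals : List Int) (dampener_used : Bool) : Decidable (Pre_is_reactor_report_valid vals dampener_used) := by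
  unfold Pre_is_reactor_report_valid; infer_instance

def pvWitness_is_reactor_report_valid : List Int × Bool := ([1, 2, 4, 5], false)

def Spec_is_reactor_report_valid (vals : List Int) (dampener_used : Bool) (out : Bool) : Prop := out = is_reactor_report_valid_alt vals dampener_used
instance (vals : List Int) (dampener_used : Bool) (out : Bool) : Decidable (Spec_is_reactor_report_valid vals dampener_used out) := by unfold Spec_is_reactor_report_valid; infer_instance

-- ===== CLAIM (what is proved, stated in full; the proofs are below) =====
def Claim_equal_is_reactor_report_valid : Prop := ∀ (vals : List Int) (dampener_used : Bool), Dom_is_reactor_report_valid vals dampener_used → Pre_is_reactor_report_valid vals dampener_used → Spec_is_reactor_report_valid vals dampener_used (is_reactor_report_valid vals dampener_used)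

-- ===== LEMMAS AND PROOFS =====

-- 'all adjacent pairs satisfy f'
def PairsOk (f : Int → Int → Bool) : List Int → Bool
  | a :: b :: t => f a b && PairsOk f (b :: t)
  | _ => true

theorem pairsOk_short (f : Int → Int → Bool) (xs : List Int) (h : xs.length ≤ 1) :
    PairsOk f xs = true := by
  match xs with
  | [] => rfl
  | [a] => rfl
  | a :: b :: t => simp only [List.length_cons] at h; omega

theorem bSafe_eq_pairsOk (lo hi : Int) (xs : List Int) :
    bSafe lo hi xs = PairsOk (fun a b => bGood lo hi (b - a)) xs := by
  match xs with
  | [] => rfl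
  | [a] => rfl
  | a :: b :: t =>
    have ih := bSafe_eq_pairsOk lo hi (b :: t)
    simp [bSafe, PairsOk] at *
    rw [← ih]

theorem pairsOk_congr (f g : Int → Int → Bool) (h : ∀ a b, f a b = g a b) (xs : List Int) :
    PairsOk f xs = PairsOk g xs := by
  match xs with
  | [] => rfl
  | [a] => rfl
  | a :: b :: t => simp [PairsOk, h, pairsOk_congr f g h (b :: t)]

theorem pairsOk_iff (f : Int → Int → Bool) (xs : List Int) :
    PairsOk f xs = true ↔ ∀ k (h : k + 1 < xs.length), f (xs[k]'(by omega)) (xs[k+1]'h) = true := by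
  match xs with
  | [] => simp [PairsOk]
  | [a] => simp [PairsOk]
  | a :: b :: t =>
    rw [PairsOk, Bool.and_eq_true, pairsOk_iff f (b :: t)]
    constructor
    · rintro ⟨h0, hrest⟩ k hk
      match k with
      | 0 => simpa using h0
      | k + 1 => simpa using hrest k (by simpa using hk)
    · intro h
      refine ⟨by simpa using h 0 (by simp), fun k hk => ?_⟩
      simpa using h (k + 1) (by simpa using hk)

theorem pyGet01 (v0 v1 : Int) (t : List Int) :
    PySem.List.pyGet? (v0 :: v1 :: t) 1 = some v1 ∧ PySem.List.pyGet? (v0 :: v1 :: t) 0 = some v0 := by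
  constructor
  · have h := PySem.List.pyGet?_ofNat (xs := v0 :: v1 :: t) (n := 1) (by simp)
    simpa using h
  · simpa using PySem.List.pyGet?_zero_cons (x := v0) (xs := v1 :: t)

theorem aCheckT_unfold (v0 v1 : Int) (t : List Int) :
    aCheckT (v0 :: v1 :: t) = aLoopT (v0 :: v1 :: t) (decide (v0 < v1)) 1 := by
  obtain ⟨h1, h0⟩ := pyGet01 v0 v1 t
  unfold aCheckT
  rw [h1, h0]

theorem A_unfold (v0 v1 : Int) (t : List Int) (damp : Bool) :
    is_reactor_report_valid (v0 :: v1 :: t) damp = aLoop (v0 :: v1 :: t) (decide (v0 < v1)) damp 1 := by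
  obtain ⟨h1, h0⟩ := pyGet01 v0 v1 t
  unfold is_reactor_report_valid
  rw [h1, h0]

theorem aPairOk_true_eq (a b : Int) : aPairOk true a b = bGood 1 3 (b - a) := by
  unfold aPairOk bGood
  rw [if_pos rfl, Bool.eq_iff_iff]
  simp only [Bool.and_eq_true, decide_eq_true_eq, abs_le]
  omega

theorem aPairOk_false_eq (a b : Int) : aPairOk false a b = bGood (-3) (-1) (b - a) := by
  unfold aPairOk bGood
  rw [if_neg Bool.false_ne_true, Bool.eq_iff_iff]
  simp only [Bool.and_eq_true, decide_eq_true_eq, abs_le]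
  omega

theorem aLoopT_drop (vals : List Int) (inc : Bool) (i : Nat) :
    aLoopT vals inc (i + 1) = PairsOk (aPairOk inc) (vals.drop i) := by
  rw [aLoopT]
  by_cases h : i + 1 < vals.length
  · have hd : vals.drop i = vals[i] :: vals[i+1] :: vals.drop (i + 2) := by
      rw [List.drop_eq_getElem_cons (by omega), List.drop_eq_getElem_cons (l := vals) (by omega)]
    have ih := aLoopT_drop vals inc (i + 1)
    rw [if_pos h, hd, PairsOk]
    have h1 : vals.getD (i + 1 - 1) 0 = vals[i] := by
      simp [List.getD_eq_getElem?_getD, List.getElem?_eq_getElem (by omega : i < vals.length)]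
    have h2 : vals.getD (i + 1) 0 = vals[i+1] := by
      simp [List.getD_eq_getElem?_getD, List.getElem?_eq_getElem h]
    rw [h1, h2]
    by_cases hp : aPairOk inc vals[i] vals[i+1] = true
    · rw [if_pos hp, hp, Bool.true_and, ih, ← List.drop_eq_getElem_cons (by omega : i + 1 < vals.length)]
    · rw [if_neg hp, Bool.eq_false_iff.mpr hp, Bool.false_and]
  · rw [if_neg h, Eq.comm]
    exact pairsOk_short _ _ (by rw [List.length_drop]; omega)
termination_by vals.length - i

theorem aLoop_damp_true (vals : List Int) (inc : Bool) (i : Nat) :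
    aLoop vals inc true i = aLoopT vals inc i := by
  rw [aLoop, aLoopT]
  by_cases h : i < vals.length
  · rw [if_pos h, if_pos h]
    by_cases hp : aPairOk inc (vals.getD (i-1) 0) (vals.getD i 0) = true
    · rw [if_pos hp, if_pos hp, aLoop_damp_true vals inc (i+1)]
    · rw [if_neg hp, if_neg hp]; rfl
  · rw [if_neg h, if_neg h]
termination_by vals.length - i

theorem aLoop_damp_false (vals : List Int) (inc : Bool) (i : Nat) :
    aLoop vals inc false i = (aLoopT vals inc i || aBrute vals 0) := by
  rw [aLoop, aLoopT]
  by_cases h : i < vals.length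
  · rw [if_pos h, if_pos h]
    by_cases hp : aPairOk inc (vals.getD (i-1) 0) (vals.getD i 0) = true
    · rw [if_pos hp, if_pos hp, aLoop_damp_false vals inc (i+1)]
    · rw [if_neg hp, if_neg hp]; simp
  · rw [if_neg h, if_neg h]; simp
termination_by vals.length - i

theorem aBrute_iff (vals : List Int) (j : Nat) :
    aBrute vals j = true ↔
      ∃ k, j ≤ k ∧ k < vals.length ∧ aCheckT (vals.take k ++ vals.drop (k+1)) = true := by
  rw [aBrute]
  by_cases h : j < vals.length
  · rw [if_pos h]
    by_cases hc : aCheckT (vals.take j ++ vals.drop (j+1)) = true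
    · simp only [if_pos hc, true_iff]
      exact ⟨j, le_refl j, h, hc⟩
    · rw [if_neg hc, aBrute_iff vals (j+1)]
      constructor
      · rintro ⟨k, hk1, hk2, hk3⟩; exact ⟨k, by omega, hk2, hk3⟩
      · rintro ⟨k, hk1, hk2, hk3⟩
        refine ⟨k, by rcases Nat.eq_or_lt_of_le hk1 with rfl | h' ; exact absurd hk3 hc; omega, hk2, hk3⟩
  · rw [if_neg h]
    constructor
    · intro hf; simp at hf
    · rintro ⟨k, hk1, hk2, _⟩; omega
termination_by vals.length - j

-- A's damp=True check, on lists of length ≥ 2, is B's two-direction safety test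
theorem aCheckT_eq (v0 v1 : Int) (t : List Int) :
    aCheckT (v0 :: v1 :: t) = (bSafe 1 3 (v0 :: v1 :: t) || bSafe (-3) (-1) (v0 :: v1 :: t)) := by
  rw [aCheckT_unfold, aLoopT_drop, List.drop_zero,
      bSafe_eq_pairsOk, bSafe_eq_pairsOk]
  by_cases h : v0 < v1
  · rw [decide_eq_true h,
        pairsOk_congr _ _ aPairOk_true_eq]
    have : PairsOk (fun a b => bGood (-3) (-1) (b - a)) (v0 :: v1 :: t) = false := by
      rw [PairsOk]
      have : bGood (-3) (-1) (v1 - v0) = false := by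
        simp only [bGood, Bool.and_eq_false_iff, decide_eq_false_iff_not]; omega
      rw [this, Bool.false_and]
    rw [this, Bool.or_false]
  · rw [decide_eq_false h,
        pairsOk_congr _ _ aPairOk_false_eq]
    have : PairsOk (fun a b => bGood 1 3 (b - a)) (v0 :: v1 :: t) = false := by
      rw [PairsOk]
      have : bGood 1 3 (v1 - v0) = false := by
        simp only [bGood, Bool.and_eq_false_iff, decide_eq_false_iff_not]; omega
      rw [this, Bool.false_and]
    rw [this, Bool.false_or]

theorem bSafe_iff (lo hi : Int) (xs : List Int) :
    bSafe lo hi xs = true ↔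
      ∀ k (h : k + 1 < xs.length), bGood lo hi (xs[k+1]'h - xs[k]'(by omega)) = true := by
  rw [bSafe_eq_pairsOk, pairsOk_iff]

theorem bFirstBad_none_iff (lo hi : Int) (xs : List Int) (k : Nat) :
    bFirstBad lo hi xs k = none ↔
      ∀ m, k ≤ m → (h : m + 1 < xs.length) →
        bGood lo hi (xs[m+1]'h - xs[m]'(by omega)) = true := by
  rw [bFirstBad]
  by_cases h : k + 1 < xs.length
  · rw [if_pos h]
    have hg : xs.getD (k+1) 0 - xs.getD k 0 = xs[k+1]'h - xs[k]'(by omega) := by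
      simp [List.getD_eq_getElem?_getD, List.getElem?_eq_getElem h,
            List.getElem?_eq_getElem (by omega : k < xs.length)]
    by_cases hb : bGood lo hi (xs.getD (k+1) 0 - xs.getD k 0) = true
    · rw [if_pos hb, bFirstBad_none_iff lo hi xs (k+1)]
      constructor
      · intro hall m hm hlt
        rcases Nat.eq_or_lt_of_le hm with rfl | h'
        · rw [← hg]; exact hb
        · exact hall m h' hlt
      · intro hall m hm hlt; exact hall m (by omega) hlt
    · simp only [if_neg hb, reduceCtorEq, false_iff, not_forall]
      exact ⟨k, le_refl k, h, by rw [← hg]; simpa using hb⟩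
  · rw [if_neg h]
    simp only [true_iff]
    intro m hm hlt; omega
termination_by xs.length - k

theorem bFirstBad_some (lo hi : Int) (xs : List Int) (k i : Nat)
    (h : bFirstBad lo hi xs k = some i) :
    k ≤ i ∧ ∃ (hlt : i + 1 < xs.length),
      bGood lo hi (xs[i+1]'hlt - xs[i]'(by omega)) = false := by
  rw [bFirstBad] at h
  by_cases hk : k + 1 < xs.length
  · rw [if_pos hk] at h
    have hg : xs.getD (k+1) 0 - xs.getD k 0 = xs[k+1]'hk - xs[k]'(by omega) := by
      simp [List.getD_eq_getElem?_getD, List.getElem?_eq_getElem hk,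
            List.getElem?_eq_getElem (by omega : k < xs.length)]
    by_cases hb : bGood lo hi (xs.getD (k+1) 0 - xs.getD k 0) = true
    · rw [if_pos hb] at h
      obtain ⟨h1, h2⟩ := bFirstBad_some lo hi xs (k+1) i h
      exact ⟨by omega, h2⟩
    · rw [if_neg hb] at h
      obtain rfl : k = i := by simpa using h
      exact ⟨le_refl k, hk, by rw [← hg]; simpa using hb⟩
  · rw [if_neg hk] at h; simp at h
termination_by xs.length - k

theorem erase_length (xs : List Int) (j : Nat) (hj : j < xs.length) :
    (xs.take j ++ xs.drop (j+1)).length = xs.length - 1 := by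
  simp [List.length_take, List.length_drop]; omega

theorem erase_get? (xs : List Int) (j k : Nat) (hj : j < xs.length) :
    (xs.take j ++ xs.drop (j+1))[k]? = if k < j then xs[k]? else xs[k+1]? := by
  by_cases h : k < j
  · rw [if_pos h, List.getElem?_append_left (by rw [List.length_take]; omega)]
    exact List.getElem?_take_of_lt h
  · rw [if_neg h, List.getElem?_append_right (by rw [List.length_take]; omega),
        List.length_take, List.getElem?_drop]
    congr 1
    omega

theorem bSafe_iff' (lo hi : Int) (xs : List Int) :
    bSafe lo hi xs = true ↔
      ∀ k a b, xs[k]? = some a → xs[k+1]? = some b → bGood lo hi (b - a) = true := by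
  rw [bSafe_iff]
  constructor
  · intro h k a b ha hb
    obtain ⟨hk0, hae⟩ := List.getElem?_eq_some_iff.mp ha
    obtain ⟨hk1, hbe⟩ := List.getElem?_eq_some_iff.mp hb
    rw [← hae, ← hbe]
    exact h k hk1
  · intro h k hk
    exact h k _ _ (List.getElem?_eq_getElem (by omega)) (List.getElem?_eq_getElem hk)

-- a bad adjacent pair survives the removal of any element other than its two endpoints
theorem not_safe_erase (lo hi : Int) (xs : List Int) (i j : Nat)
    (hi1 : i + 1 < xs.length)
    (hbad : bGood lo hi (xs[i+1]'hi1 - xs[i]'(by omega)) = false)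
    (hj : j < xs.length) (hji : j ≠ i) (hji1 : j ≠ i + 1) :
    bSafe lo hi (xs.take j ++ xs.drop (j+1)) = false := by
  rw [Bool.eq_false_iff]
  intro hsafe
  have hs := (bSafe_iff' lo hi _).mp hsafe
  have hxi : xs[i]? = some (xs[i]'(by omega)) := List.getElem?_eq_getElem (by omega)
  have hxi1 : xs[i+1]? = some (xs[i+1]'hi1) := List.getElem?_eq_getElem hi1
  rcases Nat.lt_or_ge j i with hlt | hge
  · -- j < i : the pair sits at positions (i-1, i) of the erased list
    have e1 : (xs.take j ++ xs.drop (j+1))[i-1]? = some (xs[i]'(by omega)) := by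
      rw [erase_get? xs j (i-1) hj, if_neg (by omega)]
      have : i - 1 + 1 = i := by omega
      rw [this, hxi]
    have e2 : (xs.take j ++ xs.drop (j+1))[(i-1)+1]? = some (xs[i+1]'hi1) := by
      rw [erase_get? xs j (i-1+1) hj, if_neg (by omega)]
      have : i - 1 + 1 + 1 = i + 1 := by omega
      rw [this, hxi1]
    have := hs (i-1) _ _ e1 e2
    rw [this] at hbad
    exact absurd hbad (by simp)
  · -- j > i + 1 : the pair sits at positions (i, i+1) of the erased list
    have hji2 : i + 1 < j := by omega
    have e1 : (xs.take j ++ xs.drop (j+1))[i]? = some (xs[i]'(by omega)) := by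
      rw [erase_get? xs j i hj, if_pos (by omega), hxi]
    have e2 : (xs.take j ++ xs.drop (j+1))[i+1]? = some (xs[i+1]'hi1) := by
      rw [erase_get? xs j (i+1) hj, if_pos (by omega), hxi1]
    have := hs i _ _ e1 e2
    rw [this] at hbad
    exact absurd hbad (by simp)

theorem bFix_iff (lo hi : Int) (xs : List Int) :
    bFix lo hi xs = true ↔
      (bSafe lo hi xs = true ∨
       ∃ j, j < xs.length ∧ bSafe lo hi (xs.take j ++ xs.drop (j+1)) = true) := by
  rw [bFix]
  cases hfb : bFirstBad lo hi xs 0 with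
  | none =>
    simp only [true_iff]
    left
    rw [bSafe_iff]
    intro k hk
    exact (bFirstBad_none_iff lo hi xs 0).mp hfb k (Nat.zero_le k) hk
  | some i =>
    obtain ⟨-, hlt, hbad⟩ := bFirstBad_some lo hi xs 0 i hfb
    simp only [Bool.or_eq_true]
    constructor
    · rintro (h | h)
      · exact Or.inr ⟨i, by omega, h⟩
      · exact Or.inr ⟨i + 1, by omega, h⟩
    · rintro (h | ⟨j, hjlt, hjsafe⟩)
      · rw [bSafe_iff] at h
        have := h i hlt
        rw [this] at hbad; exact absurd hbad (by simp)
      · by_cases hji : j = i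
        · subst hji; exact Or.inl hjsafe
        · by_cases hji1 : j = i + 1
          · subst hji1; exact Or.inr hjsafe
          · have := not_safe_erase lo hi xs i j hlt hbad hjlt hji hji1
            rw [hjsafe] at this; exact absurd this (by simp)

-- the main theorem, for lists written as v0 :: v1 :: t
theorem main_eq (v0 v1 : Int) (t : List Int) (damp : Bool)
    (hp : t = [] ∧ damp = false → 1 ≤ |v1 - v0| ∧ |v1 - v0| ≤ 3) :
    is_reactor_report_valid (v0 :: v1 :: t) damp =
      is_reactor_report_valid_alt (v0 :: v1 :: t) damp := by
  rw [A_unfold]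
  cases damp with
  | true =>
    rw [aLoop_damp_true, ← aCheckT_unfold, aCheckT_eq]
    rfl
  | false =>
    rw [aLoop_damp_false, ← aCheckT_unfold, aCheckT_eq]
    have halt : is_reactor_report_valid_alt (v0 :: v1 :: t) false =
        (bFix 1 3 (v0 :: v1 :: t) || bFix (-3) (-1) (v0 :: v1 :: t)) := rfl
    rw [halt]
    cases t with
    | nil =>
      -- length-2 report: Pre_ guarantees the single step is valid in one direction
      obtain ⟨ha, hb⟩ := hp ⟨rfl, rfl⟩
      have hsafe : (bSafe 1 3 [v0, v1] || bSafe (-3) (-1) [v0, v1]) = true := by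
        rcases abs_cases (v1 - v0) with ⟨he, -⟩ | ⟨he, -⟩ <;> rw [he] at ha hb <;>
          · rw [Bool.or_eq_true]
            simp only [bSafe, bGood, List.tail, List.zip, List.zipWith, List.all_cons,
              List.all_nil, Bool.and_true, Bool.and_eq_true, decide_eq_true_eq]
            omega
      rw [hsafe, Bool.true_or]
      rw [Bool.or_eq_true] at hsafe
      rw [Eq.comm, Bool.or_eq_true]
      rcases hsafe with h | h
      · exact Or.inl ((bFix_iff 1 3 [v0, v1]).mpr (Or.inl h))
      · exact Or.inr ((bFix_iff (-3) (-1) [v0, v1]).mpr (Or.inl h))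
    | cons t0 tt =>
      -- length ≥ 3: removals leave length ≥ 2, where aCheckT matches B's safety test
      set xs := v0 :: v1 :: t0 :: tt with hxs
      have h3 : 3 ≤ xs.length := by simp [hxs]
      rw [Bool.eq_iff_iff]
      simp only [Bool.or_eq_true, bFix_iff, aBrute_iff]
      have herase : ∀ j, j < xs.length →
          aCheckT (xs.take j ++ xs.drop (j+1)) =
            (bSafe 1 3 (xs.take j ++ xs.drop (j+1)) || bSafe (-3) (-1) (xs.take j ++ xs.drop (j+1))) := by
        intro j hj
        have hlen : 2 ≤ (xs.take j ++ xs.drop (j+1)).length := by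
          rw [erase_length xs j hj]; omega
        match he : xs.take j ++ xs.drop (j+1) with
        | [] => rw [he] at hlen; simp at hlen
        | [a] => rw [he] at hlen; simp at hlen
        | a :: b :: r => exact aCheckT_eq a b r
      constructor
      · rintro ((h | h) | ⟨k, -, hk, hck⟩)
        · exact Or.inl (Or.inl h)
        · exact Or.inr (Or.inl h)
        · rw [herase k hk, Bool.or_eq_true] at hck
          rcases hck with h | h
          · exact Or.inl (Or.inr ⟨k, hk, h⟩)
          · exact Or.inr (Or.inr ⟨k, hk, h⟩)
      · rintro ((h | ⟨j, hj, hsafe⟩) | (h | ⟨j, hj, hsafe⟩))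
        · exact Or.inl (Or.inl h)
        · exact Or.inr ⟨j, Nat.zero_le j, hj, by rw [herase j hj, hsafe, Bool.true_or]⟩
        · exact Or.inl (Or.inr h)
        · exact Or.inr ⟨j, Nat.zero_le j, hj, by rw [herase j hj, hsafe, Bool.or_true]⟩

-- ===== VERDICT (by name: the statement is the Claim_ definition above) =====
theorem is_reactor_report_valid_spec : Claim_equal_is_reactor_report_valid := by
  intro vals damp _ hpre
  obtain ⟨h2, hp2⟩ := hpre
  match vals with
  | [] => simp at h2
  | [a] => simp at h2
  | v0 :: v1 :: t =>
    unfold Spec_is_reactor_report_valid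
    apply main_eq
    rintro ⟨rfl, rfl⟩
    simpa using hp2 ⟨rfl, rfl⟩
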